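-- pv_equiv track=rewrite | github.com/Tony-sama/pylfit | tests/examples/sequences_learning/sequence_properties.py | resp_existence
-- ===== SOURCE A (Python) =====
-- def resp_existence(events, sequence):
--     features = []
--     values = []
--     for i, ei in enumerate(sorted(events)):
--         for ej in sorted(events)[i+1:]:
--             features.append("resp_existence_"+str(ei)+"_"+str(ej))
--             values.append((ei in sequence and ej in sequence) or (ei not in sequence))
--     return features, values
-- ===== SOURCE B (Python) =====
-- def resp_existence(events, sequence):
--     # Single reverse pass over the sorted events, maintaining the suffix already
--     # processed; each event emits its whole block at once by reusing the suffix's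
--     # cached string reprs and membership flags (bulk [True]*k when ei is absent).
--     present = set(sequence)
--     suffix_strs = []   # str(ej) for every ej after the current one, in order
--     suffix_vals = []   # (ej in present) for the same suffix
--     features = []
--     values = []
--     for ei in reversed(sorted(events)):
--         in_seq = ei in present
--         s = str(ei)
--         features = ["resp_existence_" + s + "_" + t for t in suffix_strs] + features
--         values = (suffix_vals[:] if in_seq else [True] * len(suffix_vals)) + values
--         suffix_strs = [s] + suffix_strs
--         suffix_vals = [in_seq] + suffix_vals
--     return features, values
-- ===== Notes on version B (the rewrite author's own statement) =====
-- stated objective: faster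
-- what changed: B makes a single reverse pass over the once-sorted events, maintaining the already-processed suffix's cached string reprs and membership flags and emitting each event's whole block at once (bulk [True]*k when the event is absent), instead of A's nested loops that re-sort events and scan the sequence list for every pair.
import Mathlib
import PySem

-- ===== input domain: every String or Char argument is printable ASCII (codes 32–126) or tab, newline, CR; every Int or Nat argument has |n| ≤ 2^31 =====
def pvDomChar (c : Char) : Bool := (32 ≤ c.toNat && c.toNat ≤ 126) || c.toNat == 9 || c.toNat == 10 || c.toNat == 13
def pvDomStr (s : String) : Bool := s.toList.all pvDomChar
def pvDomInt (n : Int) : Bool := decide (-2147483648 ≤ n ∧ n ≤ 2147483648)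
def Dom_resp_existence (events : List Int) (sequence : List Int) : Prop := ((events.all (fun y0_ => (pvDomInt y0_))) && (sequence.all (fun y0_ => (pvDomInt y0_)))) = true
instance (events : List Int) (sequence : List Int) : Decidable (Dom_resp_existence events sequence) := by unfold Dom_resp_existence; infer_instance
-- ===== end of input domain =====

-- B replaces A's nested loops (re-sorting inside the loop, scanning the sequence per pair) by
-- one reverse pass over the sorted events that reuses cached suffix strings/flags per block
-- (objective: faster).

-- ===== PORT A =====
-- literal transliteration of A: for i, ei in enumerate(sorted(events)): for ej in sorted(events)[i+1:]: …
def resp_existence (events : List Int) (sequence : List Int) : List String × List Bool :=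
  (PySem.List.enumerate (PySem.List.sorted events (fun x => x) false) 0).foldl
    (fun acc p =>
      (PySem.List.slice (PySem.List.sorted events (fun x => x) false) (some (p.1 + 1)) none).foldl
        (fun acc2 ej =>
          (acc2.1 ++ ["resp_existence_" ++ PySem.Int.toStr p.2 ++ "_" ++ PySem.Int.toStr ej],
           acc2.2 ++ [(sequence.contains p.2 && sequence.contains ej) || !(sequence.contains p.2)]))
        acc)
    ([], [])

-- ===== PORT B =====
-- B's loop body: state = (suffix_strs, suffix_vals, features, values)
def altStep (present : List Int)
    (st : List String × List Bool × List String × List Bool) (ei : Int) :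
    List String × List Bool × List String × List Bool :=
  let inSeq := present.contains ei
  let s := PySem.Int.toStr ei
  (s :: st.1,
   inSeq :: st.2.1,
   st.1.map (fun t => "resp_existence_" ++ s ++ "_" ++ t) ++ st.2.2.1,
   (if inSeq then st.2.1 else List.replicate st.2.1.length true) ++ st.2.2.2)

-- B: for ei in reversed(sorted(events)): … prepend the block and extend the suffix caches
def altFinish (st : List String × List Bool × List String × List Bool) :
    List String × List Bool :=
  (st.2.2.1, st.2.2.2)

def resp_existence_alt (events : List Int) (sequence : List Int) : List String × List Bool :=
  altFinish (((PySem.List.sorted events (fun x => x) false).reverse).foldl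
    (altStep (PySem.Set.ofList sequence)) ([], [], [], []))

-- ===== PRECONDITION & SPEC =====
def Spec_resp_existence (events : List Int) (sequence : List Int) (out : List String × List Bool) : Prop := out = resp_existence_alt events sequence
instance (events : List Int) (sequence : List Int) (out : List String × List Bool) : Decidable (Spec_resp_existence events sequence out) := by unfold Spec_resp_existence; infer_instance

-- ===== CLAIM (what is proved, stated in full; the proofs are below) =====
def Claim_equal_resp_existence : Prop := ∀ (events : List Int) (sequence : List Int), Dom_resp_existence events sequence → Spec_resp_existence events sequence (resp_existence events sequence)

-- ===== LEMMAS AND PROOFS =====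

-- canonical value of one pair
def pairVal (seq : List Int) (ei ej : Int) : Bool :=
  (seq.contains ei && seq.contains ej) || !(seq.contains ei)

-- canonical unzipped result over a suffix of the sorted list
def specF (t : List Int) : List String :=
  match t with
  | [] => []
  | ei :: rest =>
    rest.map (fun ej => "resp_existence_" ++ PySem.Int.toStr ei ++ "_" ++ PySem.Int.toStr ej)
      ++ specF rest

def specV (seq : List Int) (t : List Int) : List Bool :=
  match t with
  | [] => []
  | ei :: rest => rest.map (fun ej => pairVal seq ei ej) ++ specV seq rest

lemma ofList_contains (seq : List Int) (x : Int) :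
    List.contains (PySem.Set.ofList seq) x = seq.contains x := by
  by_cases h : x ∈ seq
  · simp [h, (PySem.Set.mem_ofList seq x).2 h]
  · simp [h, mt (PySem.Set.mem_ofList seq x).1 h]

-- A's inner loop appends one feature and one value per element of rest
lemma inner_loop (seq : List Int) (ei : Int) (rest : List Int) :
    ∀ acc : List String × List Bool,
    rest.foldl
        (fun acc2 ej =>
          (acc2.1 ++ ["resp_existence_" ++ PySem.Int.toStr ei ++ "_" ++ PySem.Int.toStr ej],
           acc2.2 ++ [(seq.contains ei && seq.contains ej) || !(seq.contains ei)]))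
        acc
      = (acc.1 ++ rest.map (fun ej => "resp_existence_" ++ PySem.Int.toStr ei ++ "_" ++ PySem.Int.toStr ej),
         acc.2 ++ rest.map (fun ej => pairVal seq ei ej)) := by
  induction rest with
  | nil => intro acc; simp
  | cons e t ih => intro acc; rw [List.foldl_cons, ih]; simp [pairVal]

-- A's outer loop over a suffix t of the full sorted list produces specF/specV of t
lemma outer_loop (seq full : List Int) :
    ∀ (t : List Int) (k : Nat), full.drop k = t → ∀ acc : List String × List Bool,
    (PySem.List.enumerate t (k : Int)).foldl
        (fun acc p =>
          (PySem.List.slice full (some (p.1 + 1)) none).foldl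
            (fun acc2 ej =>
              (acc2.1 ++ ["resp_existence_" ++ PySem.Int.toStr p.2 ++ "_" ++ PySem.Int.toStr ej],
               acc2.2 ++ [(seq.contains p.2 && seq.contains ej) || !(seq.contains p.2)]))
            acc)
        acc
      = (acc.1 ++ specF t, acc.2 ++ specV seq t) := by
  intro t
  induction t with
  | nil => intro k hk acc; simp [PySem.List.enumerate_nil, specF, specV]
  | cons ei rest ih =>
    intro k hk acc
    have hslice : PySem.List.slice full (some ((k : Int) + 1)) none = rest := by
      rw [show ((k : Int) + 1) = ((k + 1 : Nat) : Int) by push_cast; ring,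
          PySem.List.slice_from_natCast]
      have : full.drop (k + 1) = (full.drop k).tail := by
        rw [← List.drop_drop]; simp
      rw [this, hk]; rfl
    have hdrop : full.drop (k + 1) = rest := by
      rw [← List.drop_drop]; simp [hk]
    rw [PySem.List.enumerate_cons, List.foldl_cons]
    simp only [hslice]
    rw [inner_loop seq ei rest]
    rw [show ((k : Int) + 1) = ((k + 1 : Nat) : Int) by push_cast; ring]
    rw [ih (k + 1) hdrop]
    simp [specF, specV]

-- B's reverse pass: after consuming t.reverse, the state holds t's caches and t's blocks
lemma alt_invariant (seq : List Int) (t : List Int) :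
    (t.reverse).foldl (altStep (PySem.Set.ofList seq)) ([], [], [], [])
      = (t.map PySem.Int.toStr, t.map (fun x => seq.contains x), specF t, specV seq t) := by
  rw [List.foldl_reverse]
  induction t with
  | nil => simp [specF, specV]
  | cons ei rest ih =>
    rw [List.foldr_cons, ih]
    simp only [altStep, ofList_contains, specF, specV, List.map_cons]
    by_cases hm : ei ∈ seq
    · simp [Prod.ext_iff, pairVal, hm, List.map_map, Function.comp]
    · simp [Prod.ext_iff, pairVal, hm, List.map_map, Function.comp, List.map_const']

-- ===== VERDICT (by name: the statement is the Claim_ definition above) =====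
theorem resp_existence_spec : Claim_equal_resp_existence := by
  intro events sequence _
  show resp_existence events sequence = resp_existence_alt events sequence
  unfold resp_existence resp_existence_alt
  rw [alt_invariant sequence (PySem.List.sorted events (fun x => x) false),
    show (0 : Int) = ((0 : Nat) : Int) from rfl,
    outer_loop sequence (PySem.List.sorted events (fun x => x) false)
      (PySem.List.sorted events (fun x => x) false) 0 rfl ([], [])]
  rfl
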